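-- pv_equiv track=rewrite | github.com/xudanli/openclaw | scripts/sync-credits.py | categorize_commit_files
-- ===== SOURCE A (Python) =====
-- def categorize_commit_files(files: list[str]) -> str:
--     """Categorize a commit based on its changed files.
--
--     Returns: 'ci', 'docs only', 'docs', or 'other'
--     - 'ci': any commit with CI files (.github/, scripts/ci*)
--     - 'docs only': only documentation files (docs/ or any .md)
--     - 'docs': docs + other files mixed
--     - 'other': code without CI or docs
--     """
--     has_ci = False
--     has_docs = False
--     has_other = False
--
--     for f in files:
--         f_lower = f.lower()
--         if f_lower.startswith(".github/") or f_lower.startswith("scripts/ci"):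
--             has_ci = True
--         elif f_lower.startswith("docs/") or f_lower.endswith(".md"):
--             has_docs = True
--         else:
--             has_other = True
--
--     # CI takes priority if present
--     if has_ci:
--         return "ci"
--     if has_other:
--         if has_docs:
--             return "docs"  # Mixed: docs + other
--         return "other"  # Pure code
--     if has_docs:
--         return "docs only"  # Pure docs
--     return "other"
-- ===== SOURCE B (Python) =====
-- def categorize_commit_files(files: list[str]) -> str:
--     def is_ci(f: str) -> bool:
--         g = f.lower()
--         return g.startswith(".github/") or g.startswith("scripts/ci")
--
--     def is_docs(f: str) -> bool:
--         g = f.lower()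
--         return g.startswith("docs/") or g.endswith(".md")
--
--     if any(is_ci(f) for f in files):
--         return "ci"
--     # no CI files remain, so every file is either docs or other
--     has_docs = any(is_docs(f) for f in files)
--     has_other = any(not is_docs(f) for f in files)
--     if has_other:
--         return "docs" if has_docs else "other"
--     return "docs only" if has_docs else "other"
-- ===== Notes on version B (the rewrite author's own statement) =====
-- stated objective: simpler
-- what changed: Replaces the single flag-accumulating loop with an early 'ci' return after one any-scan, then two independent any-scans (docs / non-docs) feeding the same final cascade.
import Mathlib
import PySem

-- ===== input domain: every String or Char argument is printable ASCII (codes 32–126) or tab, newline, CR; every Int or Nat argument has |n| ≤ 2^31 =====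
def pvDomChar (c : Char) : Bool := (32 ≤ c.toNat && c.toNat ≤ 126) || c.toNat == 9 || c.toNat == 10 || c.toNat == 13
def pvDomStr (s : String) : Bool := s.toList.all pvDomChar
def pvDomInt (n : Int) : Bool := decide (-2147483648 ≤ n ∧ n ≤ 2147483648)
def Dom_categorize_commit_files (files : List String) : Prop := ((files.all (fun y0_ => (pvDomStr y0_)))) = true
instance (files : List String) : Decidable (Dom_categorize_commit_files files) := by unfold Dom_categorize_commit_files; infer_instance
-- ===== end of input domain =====

-- B replaces A's single flag-accumulating loop by an early-return CI scan followed by two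
-- independent any-scans feeding the same final cascade (objective: simpler).

-- ===== PORT A =====
-- A's single loop over three boolean flags, then the decision cascade.
def categorize_commit_files (files : List String) : String :=
  let st := files.foldl (fun (st : Bool × Bool × Bool) f =>
    let fl := PySem.Str.lower f
    if PySem.Str.startswith fl ".github/" || PySem.Str.startswith fl "scripts/ci" then
      (true, st.2.1, st.2.2)
    else if PySem.Str.startswith fl "docs/" || PySem.Str.endswith fl ".md" then
      (st.1, true, st.2.2)
    else (st.1, st.2.1, true)) (false, false, false)
  if st.1 then "ci"
  else if st.2.2 then (if st.2.1 then "docs" else "other")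
  else if st.2.1 then "docs only"
  else "other"

-- ===== PORT B =====
def pvIsCi (f : String) : Bool :=
  let g := PySem.Str.lower f
  PySem.Str.startswith g ".github/" || PySem.Str.startswith g "scripts/ci"

def pvIsDocs (f : String) : Bool :=
  let g := PySem.Str.lower f
  PySem.Str.startswith g "docs/" || PySem.Str.endswith g ".md"

def categorize_commit_files_alt (files : List String) : String :=
  if files.any pvIsCi then "ci"
  else
    let has_docs := files.any pvIsDocs
    let has_other := files.any (fun f => !pvIsDocs f)
    if has_other then (if has_docs then "docs" else "other")
    else if has_docs then "docs only" else "other"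

-- ===== PRECONDITION & SPEC =====
def Spec_categorize_commit_files (files : List String) (out : String) : Prop := out = categorize_commit_files_alt files
instance (files : List String) (out : String) : Decidable (Spec_categorize_commit_files files out) := by unfold Spec_categorize_commit_files; infer_instance

-- ===== CLAIM (what is proved, stated in full; the proofs are below) =====
def Claim_equal_categorize_commit_files : Prop := ∀ (files : List String), Dom_categorize_commit_files files → Spec_categorize_commit_files files (categorize_commit_files files)

-- ===== LEMMAS AND PROOFS =====

-- A's loop body, named for the proofs.
def pvStepA (st : Bool × Bool × Bool) (f : String) : Bool × Bool × Bool :=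
  let fl := PySem.Str.lower f
  if PySem.Str.startswith fl ".github/" || PySem.Str.startswith fl "scripts/ci" then
    (true, st.2.1, st.2.2)
  else if PySem.Str.startswith fl "docs/" || PySem.Str.endswith fl ".md" then
    (st.1, true, st.2.2)
  else (st.1, st.2.1, true)

lemma pvStepA_eq (st : Bool × Bool × Bool) (f : String) :
    pvStepA st f =
      if pvIsCi f then (true, st.2.1, st.2.2)
      else if pvIsDocs f then (st.1, true, st.2.2)
      else (st.1, st.2.1, true) := by
  simp [pvStepA, pvIsCi, pvIsDocs]

lemma pvFoldA_char (files : List String) (c d o : Bool) :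
    files.foldl pvStepA (c, d, o) =
      (c || files.any pvIsCi,
       d || files.any (fun f => !pvIsCi f && pvIsDocs f),
       o || files.any (fun f => !pvIsCi f && !pvIsDocs f)) := by
  induction files generalizing c d o with
  | nil => simp
  | cons f t ih =>
    simp only [List.foldl_cons, List.any_cons, pvStepA_eq]
    by_cases hc : pvIsCi f
    · simp [hc, ih]
    · by_cases hd : pvIsDocs f <;> simp [hc, hd, ih]

lemma pvAny_of_noCi (files : List String) (p : String → Bool)
    (h : files.any pvIsCi = false) :
    files.any (fun f => !pvIsCi f && p f) = files.any p := by
  induction files with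
  | nil => rfl
  | cons f t ih =>
    simp only [List.any_cons, Bool.or_eq_false_iff] at h
    simp [List.any_cons, h.1, ih h.2]

-- ===== VERDICT (by name: the statement is the Claim_ definition above) =====
theorem categorize_commit_files_spec : Claim_equal_categorize_commit_files := by
  intro files _
  show categorize_commit_files files = categorize_commit_files_alt files
  have hA : categorize_commit_files files =
      (let st := files.foldl pvStepA (false, false, false)
       if st.1 then "ci"
       else if st.2.2 then (if st.2.1 then "docs" else "other")
       else if st.2.1 then "docs only"
       else "other") := rfl
  rw [hA, pvFoldA_char]
  by_cases hc : files.any pvIsCi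
  · simp [categorize_commit_files_alt, hc]
  · have hc' : files.any pvIsCi = false := by simpa using hc
    simp only [categorize_commit_files_alt, hc', Bool.false_or,
      pvAny_of_noCi _ _ hc']
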